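-- pv_equiv track=rewrite | github.com/Yun-Jongwon/TIL | python/expert/1493.py | ad
-- ===== SOURCE A (Python) =====
-- def shap(li):
--     x=li[0]
--     y=li[1]
--     result=0
--     for i in range(1,x+1):
--         result=result+i
--     for j in range(y-1):
--         if y==1:
--             break
--         result=result+x+j
--
--     return result
--
-- def ad(ro):
--     count=0
--     first=ro
--     for k in range(1,10000):
--         ro=ro-k
--         count+=1
--         if ro<=0:
--             break
--     for i in range(1,count+1):
--
--         if shap([i,count+1-i])==int(first):
--             return [i,count+1-i]
-- ===== SOURCE B (Python) =====
-- def ad(ro):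
--     # Triangular-diagonal coordinates: same search-bound as A (diagonals 1..9999).
--     if ro < 1 or ro > 9999 * 10000 // 2:
--         return None
--     lo, hi = 1, 9999
--     while lo < hi:
--         mid = (lo + hi) // 2
--         if mid * (mid + 1) // 2 >= ro:
--             hi = mid
--         else:
--             lo = mid + 1
--     x = ro - lo * (lo - 1) // 2
--     return [x, lo + 1 - x]
-- ===== Notes on version B (the rewrite author's own statement) =====
-- stated objective: faster
-- what changed: A counts ro down through the diagonals one by one and then linearly searches the diagonal, recomputing the triangular sum shap from scratch for every candidate; B uses the closed-form triangular-number formula with a binary search for the diagonal and computes the coordinates directly.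
import Mathlib
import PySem

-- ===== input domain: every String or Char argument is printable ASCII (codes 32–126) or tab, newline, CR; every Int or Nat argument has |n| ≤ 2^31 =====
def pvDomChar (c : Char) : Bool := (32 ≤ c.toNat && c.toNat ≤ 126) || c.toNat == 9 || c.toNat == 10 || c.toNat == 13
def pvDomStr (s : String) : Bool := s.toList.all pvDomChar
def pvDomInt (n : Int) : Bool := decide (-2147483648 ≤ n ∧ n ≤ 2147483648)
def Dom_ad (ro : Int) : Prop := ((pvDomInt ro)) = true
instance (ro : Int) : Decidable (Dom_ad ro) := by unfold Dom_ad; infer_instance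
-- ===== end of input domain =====

-- B replaces A's two linear scans (unary count-down plus a linear search re-summing shap each
-- time) by a closed-form triangular formula with a binary search for the diagonal: simpler and faster.

-- ===== PORT A =====
-- second for-loop of Python shap (with its dead 'if y==1: break' branch kept)
def shapLoop2 (x y : Int) : List Int → Int → Int
  | [], r => r
  | j :: rest, r => if y = 1 then r else shapLoop2 x y rest (r + x + j)

-- Python shap; li[0]/li[1] via pyGet? (none = IndexError, never hit by ad's calls)
def shap (li : List Int) : Option Int :=
  match PySem.List.pyGet? li 0, PySem.List.pyGet? li 1 with
  | some x, some y =>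
      let r1 := (PySem.List.pyRange 1 (x + 1) 1).foldl (fun result i => result + i) 0
      some (shapLoop2 x y (PySem.List.pyRange 0 (y - 1) 1) r1)
  | _, _ => none

-- first for-loop of ad, with its break
def adLoop1 : List Int → Int → Int → Int × Int
  | [], ro, count => (ro, count)
  | k :: rest, ro, count =>
      let ro' := ro - k
      let count' := count + 1
      if ro' ≤ 0 then (ro', count') else adLoop1 rest ro' count'

-- second for-loop of ad with its early return
def adLoop2 (first count : Int) : List Int → Option (List Int)
  | [] => none
  | i :: rest =>
      if shap [i, count + 1 - i] = some first then some [i, count + 1 - i]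
      else adLoop2 first count rest

def ad (ro : Int) : Option (List Int) :=
  let p := adLoop1 (PySem.List.pyRange 1 10000 1) ro 0
  adLoop2 ro p.2 (PySem.List.pyRange 1 (p.2 + 1) 1)

-- ===== PORT B =====
-- the 'while lo < hi' binary search of Source B
def bsLoop (ro lo hi : Int) : Int :=
  if h : lo < hi then
    let mid := PySem.Int.floordiv (lo + hi) 2
    if ro ≤ PySem.Int.floordiv (mid * (mid + 1)) 2 then bsLoop ro lo mid
    else bsLoop ro (mid + 1) hi
  else lo
termination_by (hi - lo).toNat
decreasing_by
  · have h2 : lo + hi < hi * 2 := by omega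
    have hhi := (PySem.Int.floordiv_lt_iff_lt_mul (a := lo + hi) (b := 2) (q := hi) (by omega)).mpr h2
    omega
  · have h1 : lo * 2 ≤ lo + hi := by omega
    have hlo := (PySem.Int.le_floordiv_iff_mul_le (a := lo + hi) (b := 2) (q := lo) (by omega)).mpr h1
    omega

def ad_alt (ro : Int) : Option (List Int) :=
  if ro < 1 ∨ ro > 9999 * 10000 / 2 then none
  else
    let n := bsLoop ro 1 9999
    let x := ro - PySem.Int.floordiv (n * (n - 1)) 2
    some [x, n + 1 - x]

-- ===== PRECONDITION & SPEC =====
def Spec_ad (ro : Int) (out : Option (List Int)) : Prop := out = ad_alt ro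
instance (ro : Int) (out : Option (List Int)) : Decidable (Spec_ad ro out) := by unfold Spec_ad; infer_instance

-- ===== CLAIM (what is proved, stated in full; the proofs are below) =====
def Claim_equal_ad : Prop := ∀ (ro : Int), Dom_ad ro → Spec_ad ro (ad ro)

-- ===== LEMMAS AND PROOFS =====

-- triangular number, spec-side helper
def tri (n : Int) : Int := n * (n + 1) / 2

theorem tri_succ (n : Int) : tri (n + 1) = tri n + (n + 1) := by
  have h1 : (n + 1) * (n + 1 + 1) = n * (n + 1) + 2 * (n + 1) := by ring
  unfold tri
  rw [h1]
  omega

theorem two_tri (n : Int) : 2 * tri n = n * (n + 1) := by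
  obtain ⟨k, hk⟩ := Int.even_mul_succ_self n
  unfold tri
  omega

theorem tri_mono {p q : Int} (h0 : 0 ≤ p) (h : p ≤ q) : tri p ≤ tri q := by
  have hp := two_tri p
  have hq := two_tri q
  nlinarith

theorem floordiv_tri (n : Int) : PySem.Int.floordiv (n * (n + 1)) 2 = tri n := by
  rw [PySem.Int.floordiv_eq_ediv_of_pos (by norm_num)]; rfl

theorem sumRange (m : Nat) (init : Int) :
    (PySem.List.pyRange 1 ((m : Int) + 1) 1).foldl (fun r i => r + i) init = init + tri m := by
  induction m generalizing init with
  | zero =>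
    rw [show ((0 : Nat) : Int) + 1 = 1 by norm_num, PySem.List.pyRange_one_eq_nil le_rfl]
    have : tri 0 = 0 := by unfold tri; norm_num
    simp [this]
  | succ m ih =>
    rw [show ((m + 1 : Nat) : Int) + 1 = ((m : Int) + 1) + 1 by push_cast; ring,
      PySem.List.pyRange_one_succ_right (by omega : (1 : Int) ≤ (m : Int) + 1),
      List.foldl_append, ih]
    simp only [List.foldl]
    have h := tri_succ (m : Int)
    push_cast
    linarith

theorem shapLoop2_fold (l : List Int) (x y r : Int) (hy : y ≠ 1) :
    shapLoop2 x y l r = l.foldl (fun a j => a + x + j) r := by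
  induction l generalizing r with
  | nil => simp [shapLoop2]
  | cons j rest ih => simp [shapLoop2, hy, ih]

theorem foldRange0 (m : Nat) (x r : Int) :
    (PySem.List.pyRange 0 (m : Int) 1).foldl (fun a j => a + x + j) r
      = r + (m : Int) * x + tri ((m : Int) - 1) := by
  induction m generalizing r with
  | zero =>
    rw [show ((0 : Nat) : Int) = 0 by norm_num, PySem.List.pyRange_one_eq_nil le_rfl]
    have h0 : tri (-1) = 0 := by unfold tri; norm_num
    simp [h0]
  | succ m ih =>
    rw [show ((m + 1 : Nat) : Int) = (m : Int) + 1 by push_cast; ring,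
      PySem.List.pyRange_one_succ_right (by omega : (0 : Int) ≤ (m : Int)),
      List.foldl_append, ih]
    simp only [List.foldl]
    have h := tri_succ ((m : Int) - 1)
    push_cast at h ⊢
    have h2 : (m : Int) - 1 + 1 = (m : Int) := by ring
    rw [h2] at h
    have h3 : (m : Int) + 1 - 1 = (m : Int) := by ring
    rw [h3]
    nlinarith

theorem shap_eq (c i : Int) (h1 : 1 ≤ i) (h2 : i ≤ c) :
    shap [i, c + 1 - i] = some (tri (c - 1) + i) := by
  have hi0 : i = ((i.toNat : Nat) : Int) := by omega
  unfold shap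
  simp only [PySem.List.pyGet?, PySem.List.pyIdx?]
  norm_num
  have hsum : (PySem.List.pyRange 1 (i + 1) 1).foldl (fun r j => r + j) 0 = tri i := by
    rw [hi0, sumRange i.toNat 0]
    norm_num
  rw [hsum]
  by_cases hc : i = c
  · subst hc
    rw [show i + 1 - i - 1 = (0 : Int) by ring, PySem.List.pyRange_one_eq_nil le_rfl]
    have := tri_succ (i - 1)
    rw [show i - 1 + 1 = i by ring] at this
    simp only [shapLoop2]
    linarith
  · have hy : c + 1 - i ≠ 1 := by omega
    rw [shapLoop2_fold _ _ _ _ hy]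
    have hm : c + 1 - i - 1 = (((c - i).toNat : Nat) : Int) := by omega
    rw [hm, foldRange0 (c - i).toNat i (tri i)]
    have e1 := two_tri i
    have e2 := two_tri (((c - i).toNat : Int) - 1)
    have e3 := two_tri (c - 1)
    have hcast : (((c - i).toNat : Nat) : Int) = c - i := by omega
    rw [hcast] at e2 ⊢
    nlinarith [e1, e2, e3]

theorem loop1_gen (m : Nat) (a r c : Int) (ha : a = 10000 - (m : Int)) (ha1 : 1 ≤ a)
    (hr : 0 < r) (hle : r ≤ tri 9999 - tri (a - 1)) :
    ∃ n, a ≤ n ∧ n ≤ 9999 ∧ tri (n - 1) - tri (a - 1) < r ∧ r ≤ tri n - tri (a - 1) ∧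
      adLoop1 (PySem.List.pyRange a 10000 1) r c = (r - (tri n - tri (a - 1)), c + n - a + 1) := by
  induction m generalizing a r c with
  | zero =>
    exfalso
    have : a = 10000 := by omega
    subst this
    rw [show (10000 : Int) - 1 = 9999 by norm_num] at hle
    linarith
  | succ m ih =>
    have hlt : a < 10000 := by omega
    rw [PySem.List.pyRange_one_cons hlt]
    simp only [adLoop1]
    have htria := tri_succ (a - 1)
    rw [show a - 1 + 1 = a by ring] at htria
    by_cases hbr : r - a ≤ 0
    · refine ⟨a, le_refl a, by omega, by linarith, by linarith, ?_⟩
      rw [if_pos hbr]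
      refine Prod.ext ?_ ?_ <;> simp <;> linarith
    · rw [if_neg hbr]
      obtain ⟨n, hn1, hn2, hn3, hn4, hn5⟩ :=
        ih (a + 1) (r - a) (c + 1) (by omega) (by omega) (by omega)
          (by rw [show a + 1 - 1 = a by ring]; linarith)
      rw [show a + 1 - 1 = a by ring] at hn3 hn4
      refine ⟨n, by omega, hn2, by linarith, by linarith, ?_⟩
      rw [hn5]
      refine Prod.ext ?_ ?_ <;> simp <;> ring_nf at htria ⊢ <;> linarith

theorem loop1_nobreak (m : Nat) (a r c : Int) (ha : a = 10000 - (m : Int)) (ha1 : 1 ≤ a)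
    (hgt : tri 9999 - tri (a - 1) < r) :
    adLoop1 (PySem.List.pyRange a 10000 1) r c = (r - (tri 9999 - tri (a - 1)), c + 10000 - a) := by
  induction m generalizing a r c with
  | zero =>
    have : a = 10000 := by omega
    subst this
    rw [show (10000 : Int) - 1 = 9999 by norm_num, PySem.List.pyRange_one_eq_nil le_rfl]
    simp only [adLoop1]
    refine Prod.ext ?_ ?_ <;> simp
  | succ m ih =>
    have hlt : a < 10000 := by omega
    rw [PySem.List.pyRange_one_cons hlt]
    simp only [adLoop1]
    have htria := tri_succ (a - 1)
    rw [show a - 1 + 1 = a by ring] at htria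
    have hmono : tri a ≤ tri 9999 := tri_mono (by omega) (by omega)
    rw [if_neg (by linarith)]
    rw [ih (a + 1) (r - a) (c + 1) (by omega) (by omega)
      (by rw [show a + 1 - 1 = a by ring]; linarith)]
    rw [show a + 1 - 1 = a by ring]
    refine Prod.ext ?_ ?_ <;> simp <;> ring_nf at htria ⊢ <;> linarith

theorem loop2_none (first cnt : Int) (m : Nat) (a : Int) (ha : a = cnt + 1 - (m : Int))
    (ha1 : 1 ≤ a)
    (hne : ∀ i, a ≤ i → i ≤ cnt → tri (cnt - 1) + i ≠ first) :
    adLoop2 first cnt (PySem.List.pyRange a (cnt + 1) 1) = none := by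
  induction m generalizing a with
  | zero =>
    rw [show a = cnt + 1 by omega, PySem.List.pyRange_one_eq_nil le_rfl]
    rfl
  | succ m ih =>
    have hlt : a < cnt + 1 := by omega
    rw [PySem.List.pyRange_one_cons hlt]
    simp only [adLoop2]
    rw [shap_eq cnt a ha1 (by omega)]
    rw [if_neg (by simpa using hne a le_rfl (by omega))]
    exact ih (a + 1) (by omega) (by omega) (fun i h1 h2 => hne i (by omega) h2)

theorem loop2_find (first cnt x : Int) (hx1 : 1 ≤ x) (hx2 : x ≤ cnt)
    (hfx : first = tri (cnt - 1) + x) (m : Nat) (a : Int) (ha : a = x - (m : Int)) (ha1 : 1 ≤ a) :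
    adLoop2 first cnt (PySem.List.pyRange a (cnt + 1) 1) = some [x, cnt + 1 - x] := by
  induction m generalizing a with
  | zero =>
    have hax : a = x := by omega
    subst hax
    rw [PySem.List.pyRange_one_cons (by omega)]
    simp only [adLoop2]
    rw [shap_eq cnt a ha1 (by omega)]
    rw [if_pos (by rw [hfx])]
  | succ m ih =>
    have hax : a < x := by omega
    rw [PySem.List.pyRange_one_cons (by omega)]
    simp only [adLoop2]
    rw [shap_eq cnt a ha1 (by omega)]
    rw [if_neg (by simp [hfx]; omega)]
    exact ih (a + 1) (by omega) (by omega)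

theorem bs_spec (ro : Int) (m : Nat) (lo hi : Int) (hm : (hi - lo).toNat ≤ m)
    (hlh : lo ≤ hi) (hlow : tri (lo - 1) < ro) (hhigh : ro ≤ tri hi) :
    lo ≤ bsLoop ro lo hi ∧ bsLoop ro lo hi ≤ hi ∧
      tri (bsLoop ro lo hi - 1) < ro ∧ ro ≤ tri (bsLoop ro lo hi) := by
  induction m generalizing lo hi with
  | zero =>
    have heq : lo = hi := by omega
    rw [bsLoop, dif_neg (by omega)]
    subst heq
    exact ⟨le_refl lo, le_refl lo, hlow, hhigh⟩
  | succ m ih =>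
    by_cases hlt : lo < hi
    · rw [bsLoop, dif_pos hlt]
      simp only []
      set mid := PySem.Int.floordiv (lo + hi) 2 with hmid
      have hhi2 := (PySem.Int.floordiv_lt_iff_lt_mul (a := lo + hi) (b := 2) (q := hi)
        (by omega)).mpr (by omega)
      have hlo2 := (PySem.Int.le_floordiv_iff_mul_le (a := lo + hi) (b := 2) (q := lo)
        (by omega)).mpr (by omega)
      rw [← hmid] at hhi2 hlo2
      have htm : PySem.Int.floordiv (mid * (mid + 1)) 2 = tri mid := floordiv_tri mid
      by_cases hc : ro ≤ PySem.Int.floordiv (mid * (mid + 1)) 2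
      · rw [if_pos hc]
        rw [htm] at hc
        obtain ⟨g1, g2, g3, g4⟩ := ih lo mid (by omega) (by omega) hlow hc
        exact ⟨g1, by omega, g3, g4⟩
      · rw [if_neg hc]
        rw [htm] at hc
        rw [not_le] at hc
        obtain ⟨g1, g2, g3, g4⟩ := ih (mid + 1) hi (by omega) (by omega)
          (by rw [show mid + 1 - 1 = mid by ring]; exact hc) hhigh
        exact ⟨by omega, g2, g3, g4⟩
    · rw [bsLoop, dif_neg hlt]
      have heq : lo = hi := by omega
      subst heq
      exact ⟨le_refl lo, le_refl lo, hlow, hhigh⟩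

-- ===== VERDICT (by name: the statement is the Claim_ definition above) =====
theorem tri_const : tri 9999 = 49995000 ∧ tri 0 = 0 := by
  constructor <;> (unfold tri; norm_num)

theorem ad_spec : Claim_equal_ad := by
  intro ro _
  unfold Spec_ad ad ad_alt
  obtain ⟨h9999, h0⟩ := tri_const
  by_cases hlow : ro < 1
  · -- A: count = 1, no i matches; B: the guard returns none
    have hA1 : adLoop1 (PySem.List.pyRange 1 10000 1) ro 0 = (ro - 1, 1) := by
      rw [PySem.List.pyRange_one_cons (by norm_num)]
      simp only [adLoop1]
      rw [if_pos (by omega)]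
      norm_num
    rw [hA1]
    rw [loop2_none ro 1 1 1 (by norm_num) le_rfl
      (fun i h1 h2 => by rw [show i = 1 by omega, show (1 : Int) - 1 = 0 by norm_num, h0]; omega)]
    rw [if_pos (by omega)]
  · by_cases hhigh : ro > 49995000
    · -- A: no break (count = 9999), then no i matches; B: the guard returns none
      have hA1 := loop1_nobreak 9999 1 ro 0 (by norm_num) le_rfl
        (by rw [show (1 : Int) - 1 = 0 by ring, h0]; omega)
      rw [hA1]
      have h98 := tri_succ 9998
      rw [show (9998 : Int) + 1 = 9999 by norm_num] at h98
      have hnone : adLoop2 ro (0 + 10000 - 1) (PySem.List.pyRange 1 (0 + 10000 - 1 + 1) 1)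
          = none := by
        rw [show (0 : Int) + 10000 - 1 = 9999 by norm_num]
        exact loop2_none ro 9999 9999 1 (by norm_num) le_rfl
          (fun i h1 h2 => by rw [show (9999 : Int) - 1 = 9998 by norm_num]; omega)
      rw [hnone, if_pos (by norm_num; omega)]
    · -- main case: 1 ≤ ro ≤ tri 9999
      obtain ⟨n, hn1, hn2, hn3, hn4, hn5⟩ := loop1_gen 9999 1 ro 0 (by norm_num) le_rfl
        (by omega) (by rw [show (1 : Int) - 1 = 0 by ring, h0]; omega)
      rw [show (1 : Int) - 1 = 0 by ring, h0] at hn3 hn4 hn5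
      rw [hn5]
      have htrin := tri_succ (n - 1)
      rw [show n - 1 + 1 = n by ring] at htrin
      set x := ro - tri (n - 1) with hx
      have hx1 : 1 ≤ x := by omega
      have hx2 : x ≤ n := by omega
      have hcnt : (0 : Int) + n - 1 + 1 = n := by ring
      rw [hcnt]
      rw [loop2_find ro n x hx1 hx2 (by omega) (x - 1).toNat 1 (by omega) le_rfl]
      -- B side
      rw [if_neg (by norm_num; omega)]
      obtain ⟨g1, g2, g3, g4⟩ := bs_spec ro 9998 1 9999 (by norm_num) (by norm_num)
        (by rw [show (1 : Int) - 1 = 0 by ring, h0]; omega) (by omega)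
      set nb := bsLoop ro 1 9999 with hnb
      have hnn : nb = n := by
        rcases lt_trichotomy nb n with h | h | h
        · have := tri_mono (by omega : (0 : Int) ≤ nb) (by omega : nb ≤ n - 1)
          linarith
        · exact h
        · have := tri_mono (by omega : (0 : Int) ≤ n) (by omega : n ≤ nb - 1)
          linarith
      have hfd : PySem.Int.floordiv (n * (n - 1)) 2 = tri (n - 1) := by
        rw [show n * (n - 1) = (n - 1) * (n - 1 + 1) by ring]
        exact floordiv_tri (n - 1)
      simp only [hnn, hfd, hx]
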